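-- pv_equiv track=rewrite | github.com/Sudhanshu88/Fresher--Connect | backend/app.py | distinct_categories
-- ===== SOURCE A (Python) =====
-- def distinct_categories(jobs):
--     result = []
--     seen = set()
--     for job in jobs:
--         for category in job.get("categories") or []:
--             text = str(category).strip()
--             key = text.lower()
--             if not text or key in seen:
--                 continue
--             seen.add(key)
--             result.append(text)
--     return sorted(result, key=str.lower)
-- ===== SOURCE B (Python) =====
-- def distinct_categories(jobs):
--     items = []
--     for job in jobs:
--         for category in job.get("categories") or []:
--             text = str(category).strip()
--             if text:
--                 items.append(text)
--     items.sort(key=str.lower)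
--     out = []
--     prev = None
--     for text in items:
--         key = text.lower()
--         if key != prev:
--             out.append(text)
--             prev = key
--     return out
-- ===== Notes on version B (the rewrite author's own statement) =====
-- stated objective: alternative
-- what changed: Replaces A's per-item membership test against a growing seen-set followed by a final sort with: flatten all stripped non-empty texts, one stable sort by lowercase key, then a single linear adjacent-run dedup pass over the sorted list (stability keeps the first-seen casing of each case-insensitive group, matching A).
import Mathlib
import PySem

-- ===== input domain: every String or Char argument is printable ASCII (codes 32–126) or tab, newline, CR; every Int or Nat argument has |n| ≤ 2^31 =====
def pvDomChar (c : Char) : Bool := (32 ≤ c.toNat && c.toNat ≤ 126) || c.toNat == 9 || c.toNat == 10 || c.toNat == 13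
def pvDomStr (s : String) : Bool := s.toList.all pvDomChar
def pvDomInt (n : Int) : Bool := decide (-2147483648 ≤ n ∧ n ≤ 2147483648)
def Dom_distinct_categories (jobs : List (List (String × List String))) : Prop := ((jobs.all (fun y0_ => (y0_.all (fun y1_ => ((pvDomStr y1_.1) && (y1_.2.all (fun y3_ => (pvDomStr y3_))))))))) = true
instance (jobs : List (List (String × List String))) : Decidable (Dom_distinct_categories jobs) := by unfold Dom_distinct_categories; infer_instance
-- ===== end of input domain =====

-- B replaces A's grow-a-seen-set filtering pass + final sort by: flatten, one stable
-- sort by lowercase key, then a single adjacent-run dedup pass (alternative algorithm).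

-- ===== PORT A =====
def distinct_categories (jobs : List (List (String × List String))) : List String :=
  let st :=
    jobs.foldl
      (fun (st : List String × PySem.Set String) job =>
        (((PySem.Dict.mk job).get? "categories").getD []).foldl
          (fun (st : List String × PySem.Set String) category =>
            let text := PySem.Str.strip category
            let key := PySem.Str.lower text
            if text = "" ∨ st.2.contains key = true then st
            else (st.1 ++ [text], st.2.add key))
          st)
      ([], PySem.Set.empty)
  PySem.List.sorted st.1 (fun s => PySem.Str.lower s) false

-- ===== PORT B =====
def distinct_categories_alt (jobs : List (List (String × List String))) : List String :=
  let items :=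
    jobs.foldl
      (fun (acc : List String) job =>
        (((PySem.Dict.mk job).get? "categories").getD []).foldl
          (fun (acc : List String) category =>
            let text := PySem.Str.strip category
            if text ≠ "" then acc ++ [text] else acc)
          acc)
      []
  let sortedItems := PySem.List.sorted items (fun s => PySem.Str.lower s) false
  let st :=
    sortedItems.foldl
      (fun (st : List String × Option String) text =>
        let key := PySem.Str.lower text
        if some key ≠ st.2 then (st.1 ++ [text], some key) else st)
      ([], none)
  st.1

-- ===== PRECONDITION & SPEC =====
def Spec_distinct_categories (jobs : List (List (String × List String))) (out : List String) : Prop := out = distinct_categories_alt jobs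
instance (jobs : List (List (String × List String))) (out : List String) : Decidable (Spec_distinct_categories jobs out) := by unfold Spec_distinct_categories; infer_instance

-- ===== CLAIM (what is proved, stated in full; the proofs are below) =====
def Claim_equal_distinct_categories : Prop := ∀ (jobs : List (List (String × List String))), Dom_distinct_categories jobs → Spec_distinct_categories jobs (distinct_categories jobs)

-- ===== LEMMAS AND PROOFS =====

def klow (s : String) : String := PySem.Str.lower s

def catsOf (job : List (String × List String)) : List String :=
  ((PySem.Dict.mk job).get? "categories").getD []

def textsOf (jobs : List (List (String × List String))) : List String :=
  jobs.flatMap (fun job => (catsOf job).map (fun c => PySem.Str.strip c))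

def stepA (st : List String × PySem.Set String) (t : String) : List String × PySem.Set String :=
  if t = "" ∨ st.2.contains (klow t) = true then st else (st.1 ++ [t], st.2.add (klow t))

def stepA' (st : List String × PySem.Set String) (t : String) : List String × PySem.Set String :=
  if st.2.contains (klow t) = true then st else (st.1 ++ [t], st.2.add (klow t))

def dedupF (seen : PySem.Set String) : List String → List String
  | [] => []
  | t :: ts => if klow t ∈ seen then dedupF seen ts else t :: dedupF (seen.add (klow t)) ts

def stepB (st : List String × Option String) (t : String) : List String × Option String :=
  if some (klow t) ≠ st.2 then (st.1 ++ [t], some (klow t)) else st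

def adRun (p : String) : List String → List String
  | [] => []
  | y :: ys => if klow y = p then adRun p ys else y :: adRun (klow y) ys

def adTop : List String → List String
  | [] => []
  | y :: ys => y :: adRun (klow y) ys

def lastK (p : String) : List String → String
  | [] => p
  | y :: ys => lastK (klow y) ys

def cmpK (a b : String) : Bool := decide (klow a < klow b)

theorem dedupF_nil (seen : PySem.Set String) : dedupF seen [] = [] := rfl

theorem dedupF_cons (seen : PySem.Set String) (t : String) (ts : List String) :
    dedupF seen (t :: ts)
      = if klow t ∈ seen then dedupF seen ts else t :: dedupF (seen.add (klow t)) ts := rfl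

theorem adRun_nil (p : String) : adRun p [] = [] := rfl

theorem adRun_cons (p y : String) (ys : List String) :
    adRun p (y :: ys) = if klow y = p then adRun p ys else y :: adRun (klow y) ys := rfl

theorem adTop_cons (y : String) (ys : List String) :
    adTop (y :: ys) = y :: adRun (klow y) ys := rfl

theorem lastK_cons (p y : String) (ys : List String) :
    lastK p (y :: ys) = lastK (klow y) ys := rfl

theorem insertBy_nil (x : String) : PySem.List.insertBy cmpK x [] = [x] := rfl

theorem insertBy_cons (x y : String) (ys : List String) :
    PySem.List.insertBy cmpK x (y :: ys)
      = if cmpK x y then x :: y :: ys else y :: PySem.List.insertBy cmpK x ys := by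
  simp [PySem.List.insertBy]

theorem foldlA_nested (jobs : List (List (String × List String)))
    (st : List String × PySem.Set String) :
    jobs.foldl
      (fun st job =>
        (catsOf job).foldl
          (fun (st : List String × PySem.Set String) category =>
            let text := PySem.Str.strip category
            let key := PySem.Str.lower text
            if text = "" ∨ st.2.contains key = true then st
            else (st.1 ++ [text], st.2.add key))
          st)
      st
    = (textsOf jobs).foldl stepA st := by
  induction jobs generalizing st with
  | nil => rfl
  | cons j rest ih =>
      simp only [List.foldl_cons, textsOf, List.flatMap_cons, List.foldl_append]
      rw [ih]
      simp only [textsOf, List.foldl_map]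
      rfl

theorem foldlB_nested (jobs : List (List (String × List String))) (acc : List String) :
    jobs.foldl
      (fun (acc : List String) job =>
        (catsOf job).foldl
          (fun (acc : List String) category =>
            let text := PySem.Str.strip category
            if text ≠ "" then acc ++ [text] else acc)
          acc)
      acc
    = (textsOf jobs).foldl (fun acc t => if t ≠ "" then acc ++ [t] else acc) acc := by
  induction jobs generalizing acc with
  | nil => rfl
  | cons j rest ih =>
      simp only [List.foldl_cons, textsOf, List.flatMap_cons, List.foldl_append]
      rw [ih]
      simp only [textsOf, List.foldl_map]

theorem foldlA_filter (l : List String) (st : List String × PySem.Set String) :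
    l.foldl stepA st = (l.filter (fun t => !(t == ""))).foldl stepA' st := by
  induction l generalizing st with
  | nil => rfl
  | cons t ts ih =>
      rw [List.foldl_cons, List.filter_cons]
      by_cases h : t = ""
      · have hb : (!(t == "")) = false := by simp [h]
        rw [hb]
        have hstep : stepA st t = st := by
          simp [stepA, h]
        rw [if_neg (by simp), hstep, ih]
      · have hb : (!(t == "")) = true := by simp [h]
        rw [hb, if_pos rfl, List.foldl_cons]
        have hstep : stepA st t = stepA' st t := by
          simp [stepA, stepA', h]
        rw [hstep, ih]

theorem foldlB_filter (l : List String) (acc : List String) :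
    l.foldl (fun acc t => if t ≠ "" then acc ++ [t] else acc) acc
      = acc ++ l.filter (fun t => !(t == "")) := by
  induction l generalizing acc with
  | nil => simp
  | cons t ts ih =>
      rw [List.foldl_cons, List.filter_cons]
      by_cases h : t = ""
      · have hb : (!(t == "")) = false := by simp [h]
        rw [hb, if_neg (by simp [h]), if_neg (by simp), ih]
      · have hb : (!(t == "")) = true := by simp [h]
        rw [hb, if_pos h, if_pos rfl, ih]
        simp

theorem foldlA'_dedupF (l : List String) (st : List String × PySem.Set String) :
    l.foldl stepA' st
      = (st.1 ++ dedupF st.2 l, l.foldl (fun s t => s.add (klow t)) st.2) := by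
  induction l generalizing st with
  | nil => simp [dedupF_nil]
  | cons t ts ih =>
      rw [List.foldl_cons, List.foldl_cons, dedupF_cons]
      by_cases h : klow t ∈ st.2
      · have hc : st.2.contains (klow t) = true := (PySem.Set.contains_iff _ _).2 h
        have hstep : stepA' st t = st := by
          simp [stepA', h]
        rw [hstep, if_pos h, ih, PySem.Set.add_of_mem h]
      · have hc : ¬ st.2.contains (klow t) = true :=
          fun hcc => h ((PySem.Set.contains_iff _ _).1 hcc)
        have hstep : stepA' st t = (st.1 ++ [t], st.2.add (klow t)) := by
          simp [stepA', h]
        rw [hstep, if_neg h, ih]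
        simp

theorem dedupF_append (x : String) (l : List String) (seen : PySem.Set String) :
    dedupF seen (l ++ [x])
      = dedupF seen l ++ (if klow x ∈ seen ∨ klow x ∈ l.map klow then [] else [x]) := by
  induction l generalizing seen with
  | nil =>
      by_cases h : klow x ∈ seen
      · simp [dedupF_cons, dedupF_nil, h]
      · simp [dedupF_cons, dedupF_nil, h]
  | cons t ts ih =>
      rw [List.cons_append, dedupF_cons, dedupF_cons]
      by_cases h : klow t ∈ seen
      · rw [if_pos h, if_pos h, ih]
        congr 1
        apply if_congr _ rfl rfl
        constructor
        · rintro (h1 | h1)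
          · exact Or.inl h1
          · exact Or.inr (by rw [List.map_cons]; exact List.mem_cons_of_mem _ h1)
        · rintro (h1 | h1)
          · exact Or.inl h1
          · rw [List.map_cons] at h1
            rcases List.mem_cons.1 h1 with he | hm
            · exact Or.inl (he ▸ h)
            · exact Or.inr hm
      · rw [if_neg h, if_neg h, ih, List.cons_append]
        congr 2
        apply if_congr _ rfl rfl
        rw [PySem.Set.mem_add, List.map_cons]
        constructor
        · rintro ((h1 | h1) | h1)
          · exact Or.inl h1
          · exact Or.inr (List.mem_cons.2 (Or.inl h1))
          · exact Or.inr (List.mem_cons_of_mem _ h1)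
        · rintro (h1 | h1)
          · exact Or.inl (Or.inl h1)
          · rcases List.mem_cons.1 h1 with he | hm
            · exact Or.inl (Or.inr he)
            · exact Or.inr hm

theorem foldlB_adRun (l : List String) (out : List String) (p : String) :
    l.foldl stepB (out, some p) = (out ++ adRun p l, some (lastK p l)) := by
  induction l generalizing out p with
  | nil => simp [adRun_nil, lastK]
  | cons t ts ih =>
      rw [List.foldl_cons, adRun_cons, lastK_cons]
      by_cases h : klow t = p
      · have hstep : stepB (out, some p) t = (out, some p) := by
          simp [stepB, h]
        rw [hstep, ih, if_pos h, h]
      · have hstep : stepB (out, some p) t = (out ++ [t], some (klow t)) := by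
          simp [stepB, h]
        rw [hstep, ih, if_neg h]
        simp

theorem foldlB_adTop (l : List String) :
    (l.foldl stepB ([], none)).1 = adTop l := by
  cases l with
  | nil => rfl
  | cons y ys =>
      have hstep : stepB (([] : List String), (none : Option String)) y
          = ([y], some (klow y)) := by
        simp [stepB]
      rw [List.foldl_cons, hstep, foldlB_adRun, adTop_cons]
      simp

theorem adRun_insert_drop (x : String) (ys : List String)
    (hpw : ys.Pairwise (fun a b => klow a ≤ klow b)) (p : String)
    (hpx : p ≤ klow x) (hmem : p = klow x ∨ klow x ∈ ys.map klow)
    (hall : ∀ z ∈ ys, p ≤ klow z) :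
    adRun p (PySem.List.insertBy cmpK x ys) = adRun p ys := by
  induction ys generalizing p with
  | nil =>
      have hp : klow x = p := by
        rcases hmem with h | h
        · exact h.symm
        · simp at h
      rw [insertBy_nil, adRun_cons, if_pos hp]
  | cons z zs ih =>
      rw [insertBy_cons]
      by_cases hc : cmpK x z = true
      · have hlt : klow x < klow z := of_decide_eq_true hc
        have hp : klow x = p := by
          rcases hmem with h | h
          · exact h.symm
          · rw [List.map_cons] at h
            rcases List.mem_cons.1 h with h | h
            · exact absurd (h ▸ hlt) (lt_irrefl _)
            · rcases List.mem_map.1 h with ⟨w, hw, hkw⟩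
              have h1 : klow z ≤ klow w := (List.pairwise_cons.1 hpw).1 w hw
              exact absurd (lt_of_le_of_lt (hkw ▸ h1) hlt) (lt_irrefl _)
        rw [if_pos hc, adRun_cons, if_pos hp]
      · have hzx : klow z ≤ klow x := le_of_not_gt (fun hgt => hc (decide_eq_true hgt))
        rw [if_neg hc, adRun_cons, adRun_cons]
        by_cases hz : klow z = p
        · rw [if_pos hz, if_pos hz]
          apply ih (List.pairwise_cons.1 hpw).2 p hpx
          · rcases hmem with h | h
            · exact Or.inl h
            · rw [List.map_cons] at h
              rcases List.mem_cons.1 h with h | h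
              · exact Or.inl (h.trans hz).symm
              · exact Or.inr h
          · exact fun w hw => le_trans (hz ▸ hall z List.mem_cons_self)
              ((List.pairwise_cons.1 hpw).1 w hw)
        · rw [if_neg hz, if_neg hz]
          congr 1
          apply ih (List.pairwise_cons.1 hpw).2 (klow z) hzx
          · rcases hmem with h | h
            · exact absurd (le_antisymm (h ▸ hzx) (hall z List.mem_cons_self)) hz
            · rw [List.map_cons] at h
              rcases List.mem_cons.1 h with h | h
              · exact Or.inl h.symm
              · exact Or.inr h
          · exact (List.pairwise_cons.1 hpw).1

theorem adRun_insert_fresh (x : String) (ys : List String)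
    (hfresh : klow x ∉ ys.map klow) (p : String) (hpx : p < klow x) :
    adRun p (PySem.List.insertBy cmpK x ys)
      = PySem.List.insertBy cmpK x (adRun p ys) := by
  induction ys generalizing p with
  | nil =>
      rw [insertBy_nil, adRun_cons, if_neg (ne_of_gt hpx), adRun_nil, adRun_nil, insertBy_nil]
  | cons z zs ih =>
      have hzx : klow z ≠ klow x := by
        intro h
        exact hfresh (by rw [List.map_cons]; exact List.mem_cons.2 (Or.inl h.symm))
      have hfresh' : klow x ∉ zs.map klow := by
        intro h
        exact hfresh (by rw [List.map_cons]; exact List.mem_cons.2 (Or.inr h))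
      rw [insertBy_cons]
      by_cases hc : cmpK x z = true
      · have hlt : klow x < klow z := of_decide_eq_true hc
        have hzp : klow z ≠ p := ne_of_gt (lt_trans hpx hlt)
        rw [if_pos hc, adRun_cons, if_neg (ne_of_gt hpx), adRun_cons, if_neg hzx,
          adRun_cons, if_neg hzp, insertBy_cons, if_pos hc]
      · have hzlex : klow z ≤ klow x := le_of_not_gt (fun hgt => hc (decide_eq_true hgt))
        have hzltx : klow z < klow x := lt_of_le_of_ne hzlex hzx
        rw [if_neg hc, adRun_cons, adRun_cons]
        by_cases hz : klow z = p
        · rw [if_pos hz, if_pos hz]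
          exact ih hfresh' p hpx
        · rw [if_neg hz, if_neg hz, insertBy_cons, if_neg hc, ih hfresh' (klow z) hzltx]

theorem adTop_insert_mem (x : String) (ys : List String)
    (hpw : ys.Pairwise (fun a b => klow a ≤ klow b))
    (hmem : klow x ∈ ys.map klow) :
    adTop (PySem.List.insertBy cmpK x ys) = adTop ys := by
  cases ys with
  | nil => simp at hmem
  | cons y ys =>
      rw [insertBy_cons]
      by_cases hc : cmpK x y = true
      · have hlt : klow x < klow y := of_decide_eq_true hc
        exfalso
        rw [List.map_cons] at hmem
        rcases List.mem_cons.1 hmem with h | h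
        · exact absurd (h ▸ hlt) (lt_irrefl _)
        · rcases List.mem_map.1 h with ⟨w, hw, hkw⟩
          have h1 : klow y ≤ klow w := (List.pairwise_cons.1 hpw).1 w hw
          exact absurd (lt_of_le_of_lt (hkw ▸ h1) hlt) (lt_irrefl _)
      · have hyx : klow y ≤ klow x := le_of_not_gt (fun hgt => hc (decide_eq_true hgt))
        rw [if_neg hc, adTop_cons, adTop_cons]
        congr 1
        apply adRun_insert_drop x ys (List.pairwise_cons.1 hpw).2 (klow y) hyx
        · rw [List.map_cons] at hmem
          rcases List.mem_cons.1 hmem with h | h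
          · exact Or.inl h.symm
          · exact Or.inr h
        · exact (List.pairwise_cons.1 hpw).1

theorem adTop_insert_fresh (x : String) (ys : List String)
    (hfresh : klow x ∉ ys.map klow) :
    adTop (PySem.List.insertBy cmpK x ys)
      = PySem.List.insertBy cmpK x (adTop ys) := by
  cases ys with
  | nil => rfl
  | cons y ys =>
      have hyx : klow y ≠ klow x := by
        intro h
        exact hfresh (by rw [List.map_cons]; exact List.mem_cons.2 (Or.inl h.symm))
      have hfresh' : klow x ∉ ys.map klow := by
        intro h
        exact hfresh (by rw [List.map_cons]; exact List.mem_cons.2 (Or.inr h))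
      rw [insertBy_cons]
      by_cases hc : cmpK x y = true
      · rw [if_pos hc, adTop_cons, adRun_cons, if_neg hyx, adTop_cons, insertBy_cons,
          if_pos hc]
      · have hylex : klow y ≤ klow x := le_of_not_gt (fun hgt => hc (decide_eq_true hgt))
        have hyltx : klow y < klow x := lt_of_le_of_ne hylex hyx
        rw [if_neg hc, adTop_cons, adTop_cons, insertBy_cons, if_neg hc,
          adRun_insert_fresh x ys hfresh' (klow y) hyltx]

theorem sorted_append_singleton (l : List String) (x : String) :
    PySem.List.sorted (l ++ [x]) klow false
      = PySem.List.insertBy cmpK x (PySem.List.sorted l klow false) := by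
  rw [PySem.List.sorted_eq_foldl_insertBy, PySem.List.sorted_eq_foldl_insertBy,
    List.foldl_append]
  rfl

theorem main_core (l : List String) :
    adTop (PySem.List.sorted l klow false)
      = PySem.List.sorted (dedupF PySem.Set.empty l) klow false := by
  induction l using List.reverseRecOn with
  | nil => rfl
  | append_singleton l x ih =>
      rw [sorted_append_singleton, dedupF_append]
      by_cases hm : klow x ∈ l.map klow
      · have hmem : klow x ∈ (PySem.List.sorted l klow false).map klow := by
          rw [((PySem.List.sorted_perm l klow false).map klow).mem_iff]
          exact hm
        rw [adTop_insert_mem x _ (PySem.List.sorted_pairwise l klow) hmem, ih,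
          if_pos (Or.inr hm), List.append_nil]
      · have hset : ¬ (klow x ∈ PySem.Set.empty ∨ klow x ∈ l.map klow) := by
          rintro (h | h)
          · simp [PySem.Set.empty] at h
          · exact hm h
        have hfresh : klow x ∉ (PySem.List.sorted l klow false).map klow := by
          rw [((PySem.List.sorted_perm l klow false).map klow).mem_iff]
          exact hm
        rw [adTop_insert_fresh x _ hfresh, ih, ← sorted_append_singleton, if_neg hset]

-- ===== VERDICT (by name: the statement is the Claim_ definition above) =====
theorem distinct_categories_spec : Claim_equal_distinct_categories := by
  intro jobs _
  show distinct_categories jobs = distinct_categories_alt jobs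
  have hA : distinct_categories jobs
      = PySem.List.sorted
          (dedupF PySem.Set.empty ((textsOf jobs).filter (fun t => !(t == "")))) klow false := by
    show PySem.List.sorted
        (jobs.foldl
          (fun st job =>
            (catsOf job).foldl
              (fun (st : List String × PySem.Set String) category =>
                let text := PySem.Str.strip category
                let key := PySem.Str.lower text
                if text = "" ∨ st.2.contains key = true then st
                else (st.1 ++ [text], st.2.add key))
              st)
          ([], PySem.Set.empty)).1 klow false = _
    rw [foldlA_nested, foldlA_filter, foldlA'_dedupF]
    simp
  have hB : distinct_categories_alt jobs
      = adTop (PySem.List.sorted ((textsOf jobs).filter (fun t => !(t == ""))) klow false) := by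
    show ((PySem.List.sorted
        (jobs.foldl
          (fun (acc : List String) job =>
            (catsOf job).foldl
              (fun (acc : List String) category =>
                let text := PySem.Str.strip category
                if text ≠ "" then acc ++ [text] else acc)
              acc)
          []) klow false).foldl stepB ([], none)).1 = _
    rw [foldlB_nested, foldlB_filter, foldlB_adTop]
    simp
  rw [hA, hB, main_core]
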